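-- pv_equiv track=rewrite | github.com/obla/ozf-voting-tools | vote-counter.py | count_first_votes
-- ===== SOURCE A (Python) =====
-- def count_first_votes(voting):
--     first_votes = {}
--
--     for vote_set in voting:
--         if len(vote_set) > 0:
--             for i, vote in enumerate(vote_set):
--                 if vote not in first_votes:
--                     first_votes[vote] = 0
--                 if i == 0:
--                     first_votes[vote] += 1
--
--     return first_votes
-- ===== SOURCE B (Python) =====
-- def count_first_votes(voting):
--     # candidates in first-appearance order (ordered dedup of the flattened ballots)
--     candidates = dict.fromkeys(v for vote_set in voting for v in vote_set)
--     # the head of every non-empty ballot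
--     heads = [vote_set[0] for vote_set in voting if vote_set]
--     # count, per candidate, how many ballots put it first
--     return {c: heads.count(c) for c in candidates}
-- ===== Notes on version B (the rewrite author's own statement) =====
-- stated objective: alternative
-- what changed: Instead of A's mutable-dict tally over an enumerate/i==0 traversal, B builds the ordered dedup of all votes, extracts the list of ballot heads, and constructs the result per candidate by counting that candidate in the heads list (nested count scans, no incremental dict updates).
import Mathlib
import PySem

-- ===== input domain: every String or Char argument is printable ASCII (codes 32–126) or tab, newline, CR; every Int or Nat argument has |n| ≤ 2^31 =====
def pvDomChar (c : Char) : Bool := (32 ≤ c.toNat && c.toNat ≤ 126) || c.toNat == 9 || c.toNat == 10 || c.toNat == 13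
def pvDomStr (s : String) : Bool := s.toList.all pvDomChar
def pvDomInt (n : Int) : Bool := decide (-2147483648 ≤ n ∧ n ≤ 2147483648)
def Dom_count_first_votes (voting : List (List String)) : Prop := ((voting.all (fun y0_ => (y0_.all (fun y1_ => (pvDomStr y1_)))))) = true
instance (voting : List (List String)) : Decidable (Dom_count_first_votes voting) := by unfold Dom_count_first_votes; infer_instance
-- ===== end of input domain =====

-- B replaces A's incremental dict tally with a build-from-parts construction: ordered dedup of
-- all votes, the list of ballot heads, and one count scan per candidate; alternative, same result.

-- ===== PORT A =====
def count_first_votes (voting : List (List String)) : List (String × Int) :=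
  (voting.foldl (fun first_votes vote_set =>
      if vote_set.length > 0 then
        (PySem.List.enumerate vote_set).foldl (fun fv iv =>
          let fv := if fv.contains iv.2 then fv else fv.insert iv.2 0
          if iv.1 == 0 then fv.modify iv.2 0 (· + 1) else fv) first_votes
      else first_votes)
    PySem.Dict.empty).items

-- ===== PORT B =====
-- '[vote_set[0] for vote_set in voting if vote_set]' is ported as filterMap head? (head? is
-- some vs[0] exactly on the non-empty lists the comprehension keeps); the dict comprehension
-- over the (distinct) candidates is the fold of inserts in that order.
def count_first_votes_alt (voting : List (List String)) : List (String × Int) :=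
  let candidates := PySem.List.dedup (voting.flatMap id)
  let heads := voting.filterMap List.head?
  (candidates.foldl (fun d c => d.insert c ((heads.count c : Int))) PySem.Dict.empty).items

-- ===== PRECONDITION & SPEC =====
def Spec_count_first_votes (voting : List (List String)) (out : List (String × Int)) : Prop := out = count_first_votes_alt voting
instance (voting : List (List String)) (out : List (String × Int)) : Decidable (Spec_count_first_votes voting out) := by unfold Spec_count_first_votes; infer_instance

-- ===== CLAIM (what is proved, stated in full; the proofs are below) =====
def Claim_equal_count_first_votes : Prop := ∀ (voting : List (List String)), Dom_count_first_votes voting → Spec_count_first_votes voting (count_first_votes voting)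

-- ===== LEMMAS AND PROOFS =====

-- setdefault _ 0 never changes any getD _ 0 value
theorem sd_getD (d : PySem.Dict String Int) (v k : String) :
    (d.setdefault v 0).getD k 0 = d.getD k 0 := by
  by_cases h : d.contains v = true
  · rw [PySem.Dict.setdefault_of_contains d 0 h]
  · rw [PySem.Dict.setdefault_of_not_contains d 0 (by simpa using h),
        PySem.Dict.getD_insert]
    split_ifs with hk
    · subst hk; rw [PySem.Dict.getD_of_not_contains d 0 (by simpa using h)]
    · rfl

theorem sd_keys (d : PySem.Dict String Int) (v : String) :
    (d.setdefault v 0).keys = PySem.Set.add d.keys v := by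
  by_cases h : d.contains v = true
  · rw [PySem.Dict.setdefault_of_contains d 0 h,
        PySem.Set.add_of_mem ((PySem.Dict.contains_iff_mem_keys d v).mp h)]
  · rw [PySem.Dict.setdefault_of_not_contains d 0 (by simpa using h),
        PySem.Dict.keys_insert_of_not_contains d 0 (by simpa using h),
        PySem.Set.add_of_not_mem (fun hm => h ((PySem.Dict.contains_iff_mem_keys d v).mpr hm))]

theorem sdfold_getD (l : List String) (d : PySem.Dict String Int) (k : String) :
    (l.foldl (fun r vote => r.setdefault vote 0) d).getD k 0 = d.getD k 0 := by
  induction l generalizing d with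
  | nil => rfl
  | cons v rest ih => simp [List.foldl, ih, sd_getD]

theorem sdfold_keys (l : List String) (d : PySem.Dict String Int) :
    (l.foldl (fun r vote => r.setdefault vote 0) d).keys = PySem.Set.update d.keys l := by
  induction l generalizing d with
  | nil => simp [PySem.Set.update_nil]
  | cons v rest ih => simp [List.foldl, ih, sd_keys, PySem.Set.update_cons]

-- A's inner loop body, named
def aBody (fv : PySem.Dict String Int) (iv : Int × String) : PySem.Dict String Int :=
  let fv := if fv.contains iv.2 then fv else fv.insert iv.2 0
  if iv.1 == 0 then fv.modify iv.2 0 (· + 1) else fv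

theorem aBody_of_ne_zero (fv : PySem.Dict String Int) (iv : Int × String) (h : iv.1 ≠ 0) :
    aBody fv iv = fv.setdefault iv.2 0 := by
  unfold aBody
  rw [if_neg (by simpa using h)]
  by_cases hc : fv.contains iv.2 = true
  · rw [PySem.Dict.setdefault_of_contains fv 0 hc]; simp [hc]
  · rw [PySem.Dict.setdefault_of_not_contains fv 0 (by simpa using hc)]
    simp [hc]

-- the tail of A's enumerate loop (indices ≥ 1) is a setdefault loop
theorem aTail_eq_sdfold (rest : List String) (s : Int) (hs : 1 ≤ s) (d : PySem.Dict String Int) :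
    (PySem.List.enumerate rest s).foldl aBody d
      = rest.foldl (fun r vote => r.setdefault vote 0) d := by
  induction rest generalizing s d with
  | nil => simp [PySem.List.enumerate_nil]
  | cons v rest ih =>
      rw [PySem.List.enumerate_cons, List.foldl_cons, List.foldl_cons,
          aBody_of_ne_zero d (s, v) (by simpa using (by omega : s ≠ 0))]
      exact ih (s + 1) (by omega) _

-- A's per-ballot step
def aStep (d : PySem.Dict String Int) (vs : List String) : PySem.Dict String Int :=
  if vs.length > 0 then (PySem.List.enumerate vs).foldl aBody d else d

theorem aStep_cons (d : PySem.Dict String Int) (v : String) (rest : List String) :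
    aStep d (v :: rest)
      = rest.foldl (fun r vote => r.setdefault vote 0) ((d.setdefault v 0).modify v 0 (· + 1)) := by
  unfold aStep
  rw [if_pos (by simp), PySem.List.enumerate_cons, List.foldl_cons]
  simp only [zero_add]
  rw [aTail_eq_sdfold rest 1 le_rfl]
  congr 1
  unfold aBody
  by_cases hc : d.contains v = true
  · rw [PySem.Dict.setdefault_of_contains d 0 hc]; simp [hc]
  · rw [PySem.Dict.setdefault_of_not_contains d 0 (by simpa using hc)]; simp [hc]

theorem aStep_getD (d : PySem.Dict String Int) (vs : List String) (k : String) :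
    (aStep d vs).getD k 0 = d.getD k 0 + (if vs.head? = some k then 1 else 0) := by
  cases vs with
  | nil => simp [aStep]
  | cons v rest =>
      rw [aStep_cons, sdfold_getD, PySem.Dict.getD_modify]
      simp only [List.head?_cons, Option.some.injEq]
      split_ifs with h1 h2 h2
      · rw [sd_getD, h1]
      · exact absurd h1.symm h2
      · exact absurd h2.symm h1
      · simp [sd_getD]

theorem aStep_keys (d : PySem.Dict String Int) (vs : List String) :
    (aStep d vs).keys = PySem.Set.update d.keys vs := by
  cases vs with
  | nil => simp [aStep, PySem.Set.update_nil]
  | cons v rest =>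
      rw [aStep_cons, sdfold_keys, PySem.Dict.keys_modify,
          PySem.Dict.keys_insert_of_contains _ _ (by
            by_cases hc : d.contains v = true
            · rw [PySem.Dict.setdefault_of_contains d 0 hc]; exact hc
            · rw [PySem.Dict.setdefault_of_not_contains d 0 (by simpa using hc)]
              exact PySem.Dict.contains_insert_self d v 0),
          sd_keys, PySem.Set.update_cons]

theorem aFold_getD (voting : List (List String)) (d : PySem.Dict String Int) (k : String) :
    (voting.foldl aStep d).getD k 0
      = d.getD k 0 + ((voting.countP (fun vs => vs.head? == some k) : Int)) := by
  induction voting generalizing d with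
  | nil => simp
  | cons vs rest ih =>
      rw [List.foldl_cons, ih, aStep_getD, List.countP_cons]
      by_cases h : vs.head? = some k
      · simp [h]; ring
      · simp [h]

theorem aFold_keys (voting : List (List String)) (d : PySem.Dict String Int) :
    (voting.foldl aStep d).keys = PySem.Set.update d.keys (voting.flatMap id) := by
  induction voting generalizing d with
  | nil => simp [PySem.Set.update_nil]
  | cons vs rest ih => rw [List.foldl_cons, ih, aStep_keys, List.flatMap_cons, PySem.Set.update_append]; rfl

-- counting a candidate among the ballot heads counts the ballots whose first vote it is
theorem count_heads (voting : List (List String)) (k : String) :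
    (voting.filterMap List.head?).count k = voting.countP (fun vs => vs.head? == some k) := by
  induction voting with
  | nil => rfl
  | cons vs rest ih =>
      cases vs with
      | nil => simpa [List.countP_cons] using ih
      | cons v t =>
          simp only [List.filterMap_cons, List.head?_cons, List.count_cons, List.countP_cons, ih]
          by_cases h : v = k <;> simp [h]

-- ===== VERDICT (by name: the statement is the Claim_ definition above) =====
theorem count_first_votes_spec : Claim_equal_count_first_votes := by
  intro voting _
  unfold Spec_count_first_votes count_first_votes count_first_votes_alt
  show (voting.foldl aStep PySem.Dict.empty).items = _
  set dA := voting.foldl aStep PySem.Dict.empty with hdA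
  have hkA : dA.keys = PySem.Set.ofList (voting.flatMap id) := by
    rw [hdA, aFold_keys]
    exact PySem.Set.update_empty _
  have hnd : dA.keys.Nodup := by rw [hkA]; exact PySem.Set.nodup_ofList _
  show dA.items = ((PySem.List.dedup (voting.flatMap id)).foldl
      (fun d c => d.insert c (((voting.filterMap List.head?).count c : Int))) PySem.Dict.empty).items
  -- B's side: a fold of inserts over the fresh, distinct candidates appends its pairs
  have hB : ((PySem.List.dedup (voting.flatMap id)).foldl
        (fun d c => d.insert c (((voting.filterMap List.head?).count c : Int))) PySem.Dict.empty).items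
      = (PySem.Dict.empty : PySem.Dict String Int).items
        ++ (PySem.List.dedup (voting.flatMap id)).map
              (fun c => (c, ((voting.filterMap List.head?).count c : Int))) :=
    PySem.Dict.items_foldl_insert_fresh (PySem.List.dedup (voting.flatMap id)) (fun c => c)
      (fun c => ((voting.filterMap List.head?).count c : Int)) PySem.Dict.empty
      (by intro a _; exact PySem.Dict.contains_empty a)
      (by simp)
  rw [hB, PySem.Dict.items_eq_map_keys dA hnd 0, hkA]
  simp only [PySem.List.dedup_eq_ofList, PySem.Dict.empty]
  apply List.map_congr_left
  intro k _
  have hA : dA.getD k 0 = ((voting.countP (fun vs => vs.head? == some k) : Int)) := by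
    rw [hdA, aFold_getD, PySem.Dict.getD_empty]; ring
  rw [hA, count_heads]
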